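-- pv_equiv track=rewrite | github.com/alexj11324/BDI_LLM_Formal_Ver | src/bdi_llm/travelplanner/review.py | _is_valid_city_sequence
-- ===== SOURCE A (Python) =====
-- def _is_valid_city_sequence(city_list: list[str]) -> bool:
--     if len(city_list) < 2:
--         return False
--     visited: set[str] = set()
--     i = 0
--     while i < len(city_list):
--         city = city_list[i]
--         if city in visited and i not in (0, len(city_list) - 1):
--             return False
--         count = 0
--         while i < len(city_list) and city_list[i] == city:
--             count += 1
--             i += 1
--         if count == 1 and 0 < i - 1 < len(city_list) - 1:
--             return False
--         visited.add(city)
--     return True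
-- ===== SOURCE B (Python) =====
-- def _is_valid_city_sequence(city_list: list[str]) -> bool:
--     n = len(city_list)
--     if n < 2:
--         return False
--     # Declarative check over interior indices (1..n-2) using neighbour comparisons:
--     # no interior singleton run, and no interior run start whose city already occurred.
--     if any(city_list[j] != city_list[j - 1] and city_list[j] != city_list[j + 1]
--            for j in range(1, n - 1)):
--         return False
--     if any(city_list[j] != city_list[j - 1] and city_list[j] in city_list[:j]
--            for j in range(1, n - 1)):
--         return False
--     return True
-- ===== Notes on version B (the rewrite author's own statement) =====
-- stated objective: simpler
-- what changed: A interleaves run detection and validation in one stateful scan (outer while + inner run-consuming while + a visited set); B instead states the two rejection conditions declaratively as pure per-index tests over the interior indices - an index j is a run start iff it differs from its left neighbour, a singleton run iff it also differs from its right neighbour, a repeat iff its city occurs in the prefix slice - and just checks that no interior index violates either.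
import Mathlib
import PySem

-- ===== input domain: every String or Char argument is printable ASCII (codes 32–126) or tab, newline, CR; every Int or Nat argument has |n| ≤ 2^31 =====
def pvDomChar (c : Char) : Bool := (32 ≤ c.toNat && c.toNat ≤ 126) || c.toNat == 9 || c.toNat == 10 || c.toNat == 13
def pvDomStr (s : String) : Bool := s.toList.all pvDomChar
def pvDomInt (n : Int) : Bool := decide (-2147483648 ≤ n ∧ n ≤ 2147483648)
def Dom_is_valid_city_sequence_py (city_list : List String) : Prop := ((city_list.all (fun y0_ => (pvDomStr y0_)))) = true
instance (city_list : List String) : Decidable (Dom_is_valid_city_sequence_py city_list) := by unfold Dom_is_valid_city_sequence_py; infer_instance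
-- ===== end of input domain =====

-- B replaces A's stateful run-consuming scan (nested while loops + a visited set) by two
-- declarative passes over the interior indices, each a pure neighbour/prefix test
-- (objective: simpler; same asymptotic behaviour not claimed).

-- ===== PORT A =====
-- inner while loop of A:  while i < len(city_list) and city_list[i] == city: count += 1; i += 1
-- (fuel only makes the recursion structural; it is called with fuel = cl.length - i, enough for every iteration)
def pvCountRun (cl : List String) (city : String) (count i fuel : Nat) : Nat × Nat :=
  match fuel with
  | 0 => (count, i)
  | fuel + 1 =>
    if i < cl.length then
      if cl.getD i "" == city then pvCountRun cl city (count + 1) (i + 1) fuel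
      else (count, i)
    else (count, i)

-- outer while loop of A (fuel = cl.length - i bounds the number of outer iterations: i strictly grows)
def pvALoop (cl : List String) (visited : PySem.Set String) (i fuel : Nat) : Bool :=
  match fuel with
  | 0 => true
  | fuel + 1 =>
    if i < cl.length then
      let city := cl.getD i ""
      if PySem.Set.contains visited city && !(i == 0 || i == cl.length - 1) then false
      else
        let p := pvCountRun cl city 0 i (cl.length - i)
        if p.1 == 1 && decide (0 < p.2 - 1) && decide (p.2 - 1 < cl.length - 1) then false
        else pvALoop cl (PySem.Set.add visited city) p.2 fuel
    else true

def is_valid_city_sequence_py (city_list : List String) : Bool :=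
  if city_list.length < 2 then false
  else pvALoop city_list PySem.Set.empty 0 city_list.length

-- ===== PORT B =====
-- the generator predicates of Source B's two `any(...)` calls; for j in range(1, n-1) the
-- indices j-1, j, j+1 are all in range, so Python's city_list[·] is getD · ""
def pvSingletonAt (cl : List String) (j : Nat) : Bool :=
  (cl.getD j "" != cl.getD (j - 1) "") && (cl.getD j "" != cl.getD (j + 1) "")

-- city_list[j] in city_list[:j]  →  (cl.take j).contains (cl.getD j "")
def pvRestartAt (cl : List String) (j : Nat) : Bool :=
  (cl.getD j "" != cl.getD (j - 1) "") && (cl.take j).contains (cl.getD j "")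

-- range(1, n-1) = List.range' 1 (n-2) (n ≥ 2 holds past the guard)
def is_valid_city_sequence_py_alt (city_list : List String) : Bool :=
  if city_list.length < 2 then false
  else if (List.range' 1 (city_list.length - 2)).any (fun j => pvSingletonAt city_list j) then false
  else if (List.range' 1 (city_list.length - 2)).any (fun j => pvRestartAt city_list j) then false
  else true

-- ===== PRECONDITION & SPEC =====
def Spec_is_valid_city_sequence_py (city_list : List String) (out : Bool) : Prop := out = is_valid_city_sequence_py_alt city_list
instance (city_list : List String) (out : Bool) : Decidable (Spec_is_valid_city_sequence_py city_list out) := by unfold Spec_is_valid_city_sequence_py; infer_instance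

-- ===== CLAIM (what is proved, stated in full; the proofs are below) =====
def Claim_equal_is_valid_city_sequence_py : Prop := ∀ (city_list : List String), Dom_is_valid_city_sequence_py city_list → Spec_is_valid_city_sequence_py city_list (is_valid_city_sequence_py city_list)

-- ===== LEMMAS AND PROOFS =====

-- combined per-index violation (what A's loop rejects at a run start)
def pvViol (cl : List String) (j : Nat) : Bool :=
  decide (0 < j) && (pvSingletonAt cl j || pvRestartAt cl j)

theorem pv_getD_eq (cl : List String) (k : Nat) (h : k < cl.length) : cl.getD k "" = cl[k] := by
  simp [List.getD, List.getElem?_eq_getElem h]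

theorem pv_takeWhile_stop {α : Type} (p : α → Bool) :
    ∀ (l : List α) (k : Nat), k = (l.takeWhile p).length → (h : k < l.length) → p (l[k]) = false := by
  intro l
  induction l with
  | nil => intro k hk h; simp at h
  | cons a t ih =>
      intro k hk h
      by_cases hpa : p a = true
      · have htw : (a :: t).takeWhile p = a :: t.takeWhile p := by simp [hpa]
        rw [htw] at hk
        obtain ⟨m, rfl⟩ : ∃ m, k = m + 1 := ⟨(t.takeWhile p).length, by simpa using hk⟩
        have hm : m = (t.takeWhile p).length := by simpa using hk
        simpa using ih m hm (by simpa using h)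
      · have hpa' : p a = false := by simpa using hpa
        have htw : (a :: t).takeWhile p = [] := by simp [hpa']
        rw [htw] at hk
        simp at hk
        subst hk
        simpa using hpa'

theorem pv_takeWhile_elem {α : Type} (p : α → Bool) (l : List α) (k : Nat)
    (h : k < (l.takeWhile p).length) :
    p (l[k]'(h.trans_le (l.takeWhile_prefix p).length_le)) = true := by
  have := List.mem_takeWhile_imp (List.getElem_mem h)
  rwa [List.IsPrefix.getElem (l.takeWhile_prefix p) h] at this

theorem pv_set_contains_add (v : PySem.Set String) (c x : String) :
    PySem.Set.contains (PySem.Set.add v c) x = (PySem.Set.contains v x || x == c) := by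
  simp only [PySem.Set.add, PySem.Set.contains]
  split_ifs with h
  · by_cases hx : x = c
    · subst hx
      simp at h ⊢
      exact h
    · simp [hx]
  · have hbd : (x == c) = decide (x = c) := by by_cases hx : x = c <;> simp [hx]
    simp [hbd]

theorem pv_pvCountRun_eq (cl : List String) (city : String) :
    ∀ fuel count i, cl.length - i ≤ fuel →
      pvCountRun cl city count i fuel =
        (count + ((cl.drop i).takeWhile (· == city)).length,
         i + ((cl.drop i).takeWhile (· == city)).length) := by
  intro fuel
  induction fuel with
  | zero =>
      intro count i h
      have hge : cl.length ≤ i := by omega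
      rw [pvCountRun]
      simp [List.drop_eq_nil_of_le hge]
  | succ fuel ih =>
      intro count i h
      by_cases hi : i < cl.length
      · have hdrop : cl.drop i = cl[i] :: cl.drop (i + 1) := (List.getElem_cons_drop hi).symm
        rw [pvCountRun]
        rw [if_pos hi, pv_getD_eq cl i hi, hdrop, List.takeWhile_cons]
        by_cases hc : (cl[i] == city) = true
        · rw [if_pos hc, ih (count + 1) (i + 1) (by omega), hc]
          simp
          omega
        · have hc' : (cl[i] == city) = false := by simpa using hc
          rw [if_neg (by simp [hc']), hc']
          simp
      · have hge : cl.length ≤ i := by omega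
        rw [pvCountRun]
        simp [hi, List.drop_eq_nil_of_le hge]

-- the main invariant: A's outer loop, started at a run boundary i with visited = the set of
-- cities of cl.take i, returns "no violation at any index in [i, n-2]"
theorem pvALoop_eq_any (cl : List String) :
    ∀ (fuel i : Nat) (visited : PySem.Set String),
      cl.length - i ≤ fuel →
      (1 ≤ i → i < cl.length → cl.getD (i - 1) "" ≠ cl.getD i "") →
      (∀ x, PySem.Set.contains visited x = (cl.take i).contains x) →
      pvALoop cl visited i fuel = !((List.range' i (cl.length - 1 - i)).any (pvViol cl)) := by
  intro fuel
  induction fuel with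
  | zero =>
      intro i visited hf hb hv
      have : cl.length ≤ i := by omega
      have hr : cl.length - 1 - i = 0 := by omega
      rw [pvALoop, hr]
      simp
  | succ fuel ih =>
      intro i visited hf hb hv
      set n := cl.length with hn
      by_cases hi : i < n
      · -- notation
        have hc0 : cl.getD i "" = cl[i] := pv_getD_eq cl i hi
        set c := cl[i] with hcdef
        set cnt := ((cl.drop i).takeWhile (· == c)).length with hcnt
        have hlen_drop : (cl.drop i).length = n - i := by simp [hn]
        have hcnt_le : i + cnt ≤ n := by
          have := ((cl.drop i).takeWhile_prefix (· == c)).length_le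
          omega
        have hseg : ∀ k, i ≤ k → k < i + cnt → cl.getD k "" = c := by
          intro k hk1 hk2
          have hkn : k < n := by omega
          have h1 : k - i < ((cl.drop i).takeWhile (· == c)).length := by omega
          have h2 := pv_takeWhile_elem (· == c) (cl.drop i) (k - i) h1
          have h3 : (cl.drop i)[k - i]'(by omega) = cl[k] := by
            rw [List.getElem_drop]
            congr 1
            omega
          rw [h3] at h2
          rw [pv_getD_eq cl k hkn]
          exact eq_of_beq h2
        have hcnt_pos : 0 < cnt := by
          have hd : cl.drop i = c :: cl.drop (i + 1) := (List.getElem_cons_drop hi).symm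
          rw [hcnt, hd, List.takeWhile_cons]
          simp
        have hnext : i + cnt < n → cl.getD (i + cnt) "" ≠ c := by
          intro hlt
          have h1 : cnt < (cl.drop i).length := by omega
          have h2 := pv_takeWhile_stop (· == c) (cl.drop i) cnt hcnt h1
          have h3 : (cl.drop i)[cnt]'h1 = cl[i + cnt] := by
            rw [List.getElem_drop]
          rw [h3] at h2
          rw [pv_getD_eq cl (i + cnt) hlt]
          simpa using h2
        have hp : pvCountRun cl c 0 i (n - i) = (cnt, i + cnt) := by
          have := pv_pvCountRun_eq cl c (n - i) 0 i le_rfl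
          simpa [hcnt] using this
        -- unfold one step of the loop
        rw [pvALoop]
        rw [if_pos hi]
        simp only [← hn, hc0, hp]
        -- premises of the recursive call
        have hb' : 1 ≤ i + cnt → i + cnt < n → cl.getD (i + cnt - 1) "" ≠ cl.getD (i + cnt) "" := by
          intro _ hlt
          have h1 : cl.getD (i + cnt - 1) "" = c := hseg (i + cnt - 1) (by omega) (by omega)
          rw [h1]
          exact fun h => (hnext hlt) h.symm
        have hrep : cl.take (i + cnt) = cl.take i ++ List.replicate cnt c := by
          apply List.ext_getElem
          · simp
            omega
          · intro k hk1 hk2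
            rw [List.getElem_take]
            by_cases hki : k < i
            · rw [List.getElem_append_left (by simp; omega)]
              rw [List.getElem_take]
            · have hkmem : i ≤ k ∧ k < i + cnt := by
                simp at hk1
                omega
              rw [List.getElem_append_right (by simp; omega)]
              rw [List.getElem_replicate]
              have := hseg k hkmem.1 hkmem.2
              rw [pv_getD_eq cl k (by omega)] at this
              exact this
        have hv' : ∀ x, PySem.Set.contains (PySem.Set.add visited c) x = (cl.take (i + cnt)).contains x := by
          intro x
          rw [pv_set_contains_add, hv x, hrep]
          have hrepc : List.replicate cnt c = c :: List.replicate (cnt - 1) c := by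
            rw [show cnt = (cnt - 1) + 1 by omega]
            simp [List.replicate_succ]
          rw [hrepc, List.contains_append]
          congr 1
          by_cases hx : x = c
          · subst hx; simp
          · have h1 : x ∉ List.replicate (cnt - 1) c :=
              fun hmem => hx (List.eq_of_mem_replicate hmem)
            simp [hx, h1]
        have hrec := ih (i + cnt) (PySem.Set.add visited c) (by omega) hb' hv'
        rw [hrec]
        -- now pure boolean/range reasoning
        have hmid : ∀ k, i < k → k < i + cnt → pvViol cl k = false := by
          intro k hk1 hk2
          have h1 : cl.getD k "" = c := hseg k (by omega) hk2
          have h2 : cl.getD (k - 1) "" = c := hseg (k - 1) (by omega) (by omega)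
          have hbne : (cl.getD k "" != cl.getD (k - 1) "") = false := by
            rw [h1, h2]; simp
          simp only [pvViol, pvSingletonAt, pvRestartAt, hbne, Bool.false_and, Bool.or_self,
            Bool.and_false]
        have hviol_mid_any : ∀ m, i + m < i + cnt → (List.range' (i + 1) m).any (pvViol cl) = false := by
          intro m hm
          rw [List.any_eq_false]
          intro k hk
          rw [List.mem_range'_1] at hk
          simp [hmid k (by omega) (by omega)]
        have hif : ∀ a b t : Bool,
            (if a = true then false else if b = true then false else !t) = !(a || b || t) := by
          decide
        rw [hif]
        -- the full scan splits as: the possible violation at the run start i, then the tail scan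
        have hRHS : (List.range' i (n - 1 - i)).any (pvViol cl) =
            ((if i < n - 1 then pvViol cl i else false) ||
              (List.range' (i + cnt) (n - 1 - (i + cnt))).any (pvViol cl)) := by
          by_cases hin1 : i < n - 1
          · rw [if_pos hin1]
            by_cases hl : i + cnt ≤ n - 1
            · rw [show n - 1 - i = cnt + (n - 1 - (i + cnt)) by omega]
              rw [← List.range'_append_1, List.any_append]
              rw [show cnt = (cnt - 1) + 1 by omega, List.range'_succ, List.any_cons]
              rw [hviol_mid_any (cnt - 1) (by omega)]
              rw [show i + (cnt - 1 + 1) = i + cnt by omega]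
              simp
            · have hl2 : i + cnt = n := by omega
              have hc2 : 2 ≤ cnt := by omega
              rw [show n - 1 - (i + cnt) = 0 by omega]
              rw [show n - 1 - i = (cnt - 2) + 1 by omega, List.range'_succ, List.any_cons]
              rw [hviol_mid_any (cnt - 2) (by omega)]
              simp
          · rw [if_neg hin1]
            rw [show n - 1 - i = 0 by omega, show n - 1 - (i + cnt) = 0 by omega]
            simp
        rw [hRHS]
        -- the two rejection tests at the run start compute exactly that head violation
        have hkey : ((PySem.Set.contains visited c && !(i == 0 || i == n - 1)) ||
            (cnt == 1 && decide (0 < i + cnt - 1) && decide (i + cnt - 1 < n - 1))) =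
            (if i < n - 1 then pvViol cl i else false) := by
          by_cases hin1 : i < n - 1
          · rw [if_pos hin1]
            by_cases hi0 : i = 0
            · have hF1 : (PySem.Set.contains visited c && !(i == 0 || i == n - 1)) = false := by
                simp [hi0]
              have hF2 : (cnt == 1 && decide (0 < i + cnt - 1) && decide (i + cnt - 1 < n - 1)) = false := by
                by_cases hcnt1 : cnt = 1
                · simp [hi0, hcnt1]
                · simp [hcnt1]
              have hV : pvViol cl i = false := by simp [pvViol, hi0]
              rw [hF1, hF2, hV]
              rfl
            · have hbne : (c != cl.getD (i - 1) "") = true := by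
                rw [bne_iff_ne]
                intro h
                exact hb (by omega) hi (by rw [hc0, ← h])
              have hguard : (i == 0 || i == n - 1) = false := by
                simp
                omega
              by_cases hcnt1 : cnt = 1
              · have hF2 : (cnt == 1 && decide (0 < i + cnt - 1) && decide (i + cnt - 1 < n - 1)) = true := by
                  simp [hcnt1]
                  omega
                have hnx : cl.getD (i + 1) "" ≠ c := by
                  have := hnext (by omega)
                  rwa [show i + cnt = i + 1 by omega] at this
                have h2 : (c != cl.getD (i + 1) "") = true := by
                  rw [bne_iff_ne]
                  exact fun h => hnx h.symm
                have hsing : pvSingletonAt cl i = true := by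
                  unfold pvSingletonAt
                  rw [hc0, hbne, h2]
                  rfl
                have hV : pvViol cl i = true := by
                  unfold pvViol
                  rw [hsing]
                  simp
                  omega
                rw [hF2, hV]
                simp
              · have hF2 : (cnt == 1 && decide (0 < i + cnt - 1) && decide (i + cnt - 1 < n - 1)) = false := by
                  simp [hcnt1]
                have hsing : pvSingletonAt cl i = false := by
                  have h1 : cl.getD (i + 1) "" = c := hseg (i + 1) (by omega) (by omega)
                  unfold pvSingletonAt
                  rw [hc0, h1]
                  simp
                have hrest : pvRestartAt cl i = (cl.take i).contains c := by
                  unfold pvRestartAt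
                  rw [hc0, hbne]
                  simp
                have hV : pvViol cl i = (cl.take i).contains c := by
                  unfold pvViol
                  rw [hsing, hrest]
                  have hd : decide (0 < i) = true := by simp; omega
                  rw [hd]
                  simp
                have hF1 : (PySem.Set.contains visited c && !(i == 0 || i == n - 1)) = (cl.take i).contains c := by
                  rw [hguard, hv c]
                  simp
                rw [hF1, hF2, hV]
                simp
          · rw [if_neg hin1]
            have hi_last : i = n - 1 := by omega
            have hc1 : cnt = 1 := by omega
            have hF1 : (PySem.Set.contains visited c && !(i == 0 || i == n - 1)) = false := by
              simp [hi_last]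
            have hF2 : (cnt == 1 && decide (0 < i + cnt - 1) && decide (i + cnt - 1 < n - 1)) = false := by
              simp [hc1]
              omega
            rw [hF1, hF2]
            rfl
        rw [← hkey]
      · rw [pvALoop]
        have hr : n - 1 - i = 0 := by omega
        rw [if_neg hi, hr]
        simp

theorem pv_any_congr_mem {α : Type} (l : List α) (f g : α → Bool) (h : ∀ x ∈ l, f x = g x) :
    l.any f = l.any g := by
  induction l with
  | nil => rfl
  | cons a t ih => simp [List.any_cons, h a (by simp), ih (fun x hx => h x (by simp [hx]))]

-- split Source B's two `any` passes into the single combined scan pvViol ranges over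
theorem pv_any_or (l : List Nat) (f g : Nat → Bool) :
    l.any (fun j => f j || g j) = (l.any f || l.any g) := by
  induction l with
  | nil => simp
  | cons a t ih =>
      simp [List.any_cons, ih]
      cases f a <;> cases g a <;> simp

-- ===== VERDICT (by name: the statement is the Claim_ definition above) =====
theorem is_valid_city_sequence_py_spec : Claim_equal_is_valid_city_sequence_py := by
  intro cl _
  unfold Spec_is_valid_city_sequence_py is_valid_city_sequence_py is_valid_city_sequence_py_alt
  by_cases h2 : cl.length < 2
  · simp [h2]
  · rw [if_neg h2, if_neg h2]
    have hmain := pvALoop_eq_any cl cl.length 0 PySem.Set.empty (by omega)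
      (by omega) (by intro x; simp [PySem.Set.contains, PySem.Set.empty])
    rw [hmain]
    have hsplit : cl.length - 1 - 0 = 1 + (cl.length - 2) := by omega
    rw [hsplit, show (0 : Nat) = 0 by rfl]
    have hcons : List.range' 0 (1 + (cl.length - 2)) = 0 :: List.range' 1 (cl.length - 2) := by
      rw [Nat.add_comm 1, List.range'_succ]
    rw [hcons, List.any_cons]
    have h0 : pvViol cl 0 = false := by simp [pvViol]
    rw [h0, Bool.false_or]
    have hcomb : (List.range' 1 (cl.length - 2)).any (pvViol cl) =
        ((List.range' 1 (cl.length - 2)).any (fun j => pvSingletonAt cl j)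
          || (List.range' 1 (cl.length - 2)).any (fun j => pvRestartAt cl j)) := by
      rw [← pv_any_or]
      apply pv_any_congr_mem
      intro j hj
      rw [List.mem_range'_1] at hj
      simp [pvViol]
      omega
    rw [hcomb]
    cases hS : (List.range' 1 (cl.length - 2)).any (fun j => pvSingletonAt cl j) <;>
      cases hR : (List.range' 1 (cl.length - 2)).any (fun j => pvRestartAt cl j) <;> simp
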